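-- pv_equiv track=rewrite | github.com/zhou-jk/kv-cache-hackthon | policies/simple.py | _contiguous_prefix_len
-- ===== SOURCE A (Python) =====
-- from typing import Dict, Iterable, List
-- from typing import Any, Dict, Iterable, Set
--
-- def _contiguous_prefix_len(blocks: Iterable[int]) -> int:
--     s = set(blocks)
--     if 1 not in s:
--         return 0
--     k = 1
--     while (k + 1) in s:
--         k += 1
--     return k
-- ===== SOURCE B (Python) =====
-- def _contiguous_prefix_len(blocks):
--     count = 0
--     expected = 1
--     for v in sorted(set(blocks)):
--         if v < expected:
--             continue
--         if v == expected:
--             count += 1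
--             expected += 1
--         else:
--             break
--     return count
-- ===== Notes on version B (the rewrite author's own statement) =====
-- stated objective: alternative
-- what changed: Replaces the upward membership-probing while loop over a set with a single scan of the sorted deduplicated list that counts the run 1,2,3,... and breaks at the first gap.
import Mathlib
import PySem

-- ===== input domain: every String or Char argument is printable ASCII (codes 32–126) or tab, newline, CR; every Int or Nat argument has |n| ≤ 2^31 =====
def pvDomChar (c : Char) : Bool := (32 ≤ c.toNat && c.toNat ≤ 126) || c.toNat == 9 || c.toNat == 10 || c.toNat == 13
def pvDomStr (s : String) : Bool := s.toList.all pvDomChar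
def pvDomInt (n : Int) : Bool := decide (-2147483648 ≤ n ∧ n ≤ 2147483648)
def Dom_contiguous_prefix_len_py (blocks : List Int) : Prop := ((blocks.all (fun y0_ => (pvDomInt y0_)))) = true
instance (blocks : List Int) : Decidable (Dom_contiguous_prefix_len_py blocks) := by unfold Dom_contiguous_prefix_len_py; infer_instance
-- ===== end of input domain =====

-- B replaces A's upward membership-probing while loop over the set with one scan of the
-- sorted deduplicated list (count the run 1,2,3,…, break at the first gap); alternative
-- decomposition, same exact return value.

-- ===== PORT A =====
-- termination helper for A's while loop: each iteration adds k+1 to the visited range,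
-- strictly shrinking the elements of s above k
theorem pvFilterLt (s : List Int) (k : Int) (h : (k+1) ∈ s) :
    (s.filter (fun x => decide (k+1 < x))).length < (s.filter (fun x => decide (k < x))).length := by
  induction s with
  | nil => cases h
  | cons a t ih =>
    have hmono : (t.filter (fun x => decide (k+1 < x))).length ≤ (t.filter (fun x => decide (k < x))).length :=
      (List.monotone_filter_right t (fun x hx => by simp at hx ⊢; omega)).length_le
    rcases List.mem_cons.1 h with rfl | ha
    · simp only [List.filter_cons]
      have h1 : (decide (k+1 < k+1)) = false := by simp
      have h2 : (decide (k < k+1)) = true := by simp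
      rw [h1, h2]
      simpa using Nat.lt_succ_of_le hmono
    · have := ih ha
      simp only [List.filter_cons]
      by_cases hk1 : k+1 < a
      · have hk : k < a := by omega
        simp [hk1, hk]
        omega
      · by_cases hk : k < a
        · simp [hk1, hk]; omega
        · simp [hk1, hk]; omega

-- A's while loop: while (k+1) in s: k += 1; return k
def pvLoopA (s : List Int) (k : Int) : Int :=
  if h : (k+1) ∈ s then pvLoopA s (k+1) else k
termination_by (s.filter (fun x => decide (k < x))).length
decreasing_by exact pvFilterLt s k h

def contiguous_prefix_len_py (blocks : List Int) : Int :=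
  let s : PySem.Set Int := PySem.Set.ofList blocks
  if (1 : Int) ∈ s then pvLoopA s 1 else 0

-- ===== PORT B =====
-- one pass over the sorted deduplicated list
def pvScan : List Int → Int → Int → Int
  | [], _, count => count
  | v :: rest, expected, count =>
    if v < expected then pvScan rest expected count
    else if v = expected then pvScan rest (expected + 1) (count + 1)
    else count

def contiguous_prefix_len_py_alt (blocks : List Int) : Int :=
  pvScan (PySem.List.sorted (PySem.Set.ofList blocks) (fun x => x) false) 1 0

-- ===== PRECONDITION & SPEC =====
def Spec_contiguous_prefix_len_py (blocks : List Int) (out : Int) : Prop := out = contiguous_prefix_len_py_alt blocks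
instance (blocks : List Int) (out : Int) : Decidable (Spec_contiguous_prefix_len_py blocks out) := by unfold Spec_contiguous_prefix_len_py; infer_instance

-- ===== CLAIM (what is proved, stated in full; the proofs are below) =====
def Claim_equal_contiguous_prefix_len_py : Prop := ∀ (blocks : List Int), Dom_contiguous_prefix_len_py blocks → Spec_contiguous_prefix_len_py blocks (contiguous_prefix_len_py blocks)

-- ===== LEMMAS AND PROOFS =====

-- characterisation of A's loop result
theorem pvLoopA_char (s : List Int) (k : Int) :
    k ≤ pvLoopA s k ∧ (∀ i, k < i → i ≤ pvLoopA s k → i ∈ s) ∧ (pvLoopA s k + 1) ∉ s := by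
  induction k using pvLoopA.induct (s := s) with
  | case1 k h ih =>
    rw [pvLoopA, dif_pos h]
    obtain ⟨h1, h2, h3⟩ := ih
    refine ⟨by omega, ?_, h3⟩
    intro i hi hir
    rcases eq_or_lt_of_le (by omega : k + 1 ≤ i) with rfl | hlt
    · exact h
    · exact h2 i hlt hir
  | case2 k h =>
    rw [pvLoopA, dif_neg h]
    exact ⟨le_refl _, fun i hi hir => absurd (lt_of_lt_of_le hi hir) (lt_irrefl _), h⟩

-- characterisation of B's scan on a strictly increasing list
theorem pvScan_char (l : List Int) (e c : Int) (hp : l.Pairwise (· < ·)) :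
    c ≤ pvScan l e c ∧ (∀ i, e ≤ i → i < e + (pvScan l e c - c) → i ∈ l) ∧
      (e + (pvScan l e c - c)) ∉ l := by
  induction l generalizing e c with
  | nil =>
    simp only [pvScan]
    exact ⟨le_refl _, fun i h1 h2 => absurd h2 (by omega), by simp⟩
  | cons v rest ih =>
    have hv : ∀ x ∈ rest, v < x := fun x hx => List.rel_of_pairwise_cons hp hx
    have hp' : rest.Pairwise (· < ·) := hp.of_cons
    by_cases h1 : v < e
    · simp only [pvScan, if_pos h1]
      obtain ⟨g1, g2, g3⟩ := ih e c hp'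
      refine ⟨g1, fun i hi hir => List.mem_cons_of_mem v (g2 i hi hir), ?_⟩
      intro hmem
      rcases List.mem_cons.1 hmem with heq | hmem'
      · omega
      · exact g3 hmem'
    · by_cases h2 : v = e
      · simp only [pvScan, if_neg h1, if_pos h2]
        obtain ⟨g1, g2, g3⟩ := ih (e+1) (c+1) hp'
        set r := pvScan rest (e+1) (c+1) with hr
        refine ⟨by omega, ?_, ?_⟩
        · intro i hi hir
          rcases eq_or_lt_of_le hi with rfl | hlt
          · exact List.mem_cons.2 (Or.inl h2.symm)
          · exact List.mem_cons_of_mem v (g2 i (by omega) (by omega))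
        · intro hmem
          rcases List.mem_cons.1 hmem with heq | hmem'
          · omega
          · have heq : e + 1 + (r - (c+1)) = e + (r - c) := by omega
            rw [heq] at g3
            exact g3 hmem'
      · simp only [pvScan, if_neg h1, if_neg h2]
        refine ⟨le_refl _, fun i hi hir => absurd hir (by omega), ?_⟩
        intro hmem
        have he : e + (c - c) = e := by omega
        rw [he] at hmem
        rcases List.mem_cons.1 hmem with heq | hmem'
        · omega
        · have := hv e hmem'; omega

-- the length of the contiguous prefix is unique given its characterisation
theorem pvUniq (s : List Int) (r r' : Int) (h0 : 0 ≤ r) (h0' : 0 ≤ r')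
    (hm : ∀ i, 1 ≤ i → i ≤ r → i ∈ s) (hn : (r + 1) ∉ s)
    (hm' : ∀ i, 1 ≤ i → i ≤ r' → i ∈ s) (hn' : (r' + 1) ∉ s) : r = r' := by
  by_contra hne
  rcases lt_or_gt_of_ne hne with hlt | hgt
  · exact hn (hm' (r+1) (by omega) (by omega))
  · exact hn' (hm (r'+1) (by omega) (by omega))

-- ===== VERDICT (by name: the statement is the Claim_ definition above) =====
theorem contiguous_prefix_len_py_spec : Claim_equal_contiguous_prefix_len_py := by
  intro blocks _
  unfold Spec_contiguous_prefix_len_py contiguous_prefix_len_py contiguous_prefix_len_py_alt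
  set s : PySem.Set Int := PySem.Set.ofList blocks with hs
  set l := PySem.List.sorted s (fun x => x) false with hl
  have hperm : l.Perm s := PySem.List.sorted_perm s (fun x => x) false
  have hmem : ∀ x : Int, x ∈ l ↔ x ∈ s := fun x => hperm.mem_iff
  have hnd : l.Nodup := hperm.nodup_iff.2 (PySem.Set.nodup_ofList blocks)
  have hle : l.Pairwise (fun a b : Int => a ≤ b) := PySem.List.sorted_pairwise s (fun x => x)
  have hlt : l.Pairwise (· < ·) := by
    have := hle.and hnd
    exact this.imp (fun h => lt_of_le_of_ne h.1 h.2)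
  obtain ⟨b0, bm, bn⟩ := pvScan_char l 1 0 hlt
  set rb := pvScan l 1 0 with hrb
  have bm' : ∀ i, 1 ≤ i → i ≤ rb → i ∈ s := fun i h1 h2 => (hmem i).1 (bm i h1 (by omega))
  have bn' : (rb + 1) ∉ s := fun h => bn (by
    have : (1 : Int) + (rb - 0) = rb + 1 := by omega
    rw [this]; exact (hmem _).2 h)
  by_cases h1 : (1 : Int) ∈ s
  · rw [if_pos h1]
    obtain ⟨a0, am, an⟩ := pvLoopA_char s 1
    refine pvUniq s _ _ (by omega) b0 ?_ an bm' bn'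
    intro i hi hir
    rcases eq_or_lt_of_le hi with rfl | hlt2
    · exact h1
    · exact am i hlt2 hir
  · rw [if_neg h1]
    refine pvUniq s 0 rb (le_refl _) b0 (fun i hi hir => absurd (le_trans hi hir) (by omega)) ?_ bm' bn'
    simpa using h1
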